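-- pv_equiv track=rewrite | github.com/costune/AutoMesh | scripts/texture_bake.py | build_progressive_schedule
-- ===== SOURCE A (Python) =====
-- def build_progressive_schedule(
--     init_size: int,
--     final_size: int,
--     total_epochs: int,
-- ) -> list:
--     """
--     构建从 init_size 到 final_size 的 2× 逐级分辨率调度表。
--
--     Parameters
--     ----------
--     init_size    : 起始纹理分辨率（2 的幂）
--     final_size   : 最终纹理分辨率
--     total_epochs : 全部 epoch 数，均匀分配到各级
--
--     Returns
--     -------
--     [(size, epochs), ...] 从低到高排列
--     """
--     sizes, s = [], init_size
--     while s < final_size: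
--         sizes.append(s)
--         s *= 2
--     sizes.append(final_size)
--
--     n = len(sizes)
--     epochs_per = max(1, total_epochs // n)
--     schedule = [(sz, epochs_per) for sz in sizes[:-1]]
--     # 最后一级吸收余数
--     schedule.append((final_size, total_epochs - epochs_per * (n - 1)))
--     return schedule
-- ===== SOURCE B (Python) =====
-- def build_progressive_schedule(
--     init_size: int,
--     final_size: int,
--     total_epochs: int,
-- ) -> list:
--     """Closed-form 2x schedule: count levels arithmetically instead of looping."""
--     if final_size > init_size and init_size > 0:
--         count = ((final_size - 1) // init_size).bit_length()
--     else:
--         count = 0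
--     sizes = [init_size << i for i in range(count)] + [final_size]
--     n = len(sizes)
--     epochs_per = max(1, total_epochs // n)
--     tail = (final_size, total_epochs - epochs_per * (n - 1))
--     return [(sz, epochs_per) for sz in sizes[:-1]] + [tail]
-- ===== Notes on version B (the rewrite author's own statement) =====
-- stated objective: alternative
-- what changed: Replaces the doubling while-loop with a closed-form level count ((final_size-1)//init_size).bit_length() and builds the size list directly with shifts.
import Mathlib
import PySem

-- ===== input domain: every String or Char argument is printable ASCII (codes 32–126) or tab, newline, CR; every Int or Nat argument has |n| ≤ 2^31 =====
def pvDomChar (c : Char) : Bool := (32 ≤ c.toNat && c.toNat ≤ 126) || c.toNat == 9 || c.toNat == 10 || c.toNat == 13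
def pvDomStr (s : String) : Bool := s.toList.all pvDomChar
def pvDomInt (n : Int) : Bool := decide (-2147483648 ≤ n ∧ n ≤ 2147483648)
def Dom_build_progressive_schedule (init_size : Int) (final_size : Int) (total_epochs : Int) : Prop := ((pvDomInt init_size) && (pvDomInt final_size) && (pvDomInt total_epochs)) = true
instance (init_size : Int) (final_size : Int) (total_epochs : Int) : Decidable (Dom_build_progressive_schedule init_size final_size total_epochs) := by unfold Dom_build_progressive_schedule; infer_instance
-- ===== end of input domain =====

-- B replaces A's doubling while-loop by a closed-form level count (bit_length of
-- (final_size-1)//init_size); equivalence of the RETURN value is proved on Pre_.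

-- ===== PORT A =====
-- the 'while s < final_size' loop; the extra '0 < s' in the guard only makes the
-- recursion terminate in Lean — Python diverges when s ≤ 0 < final_size (outside Pre_)
def pvLoopA (final_size : Int) (s : Int) (acc : List Int) : List Int :=
  if 0 < s ∧ s < final_size then pvLoopA final_size (s * 2) (acc ++ [s]) else acc
termination_by (final_size - s).toNat
decreasing_by omega

def build_progressive_schedule (init_size : Int) (final_size : Int) (total_epochs : Int) : List (Int × Int) :=
  let sizes := pvLoopA final_size init_size [] ++ [final_size]
  let n : Int := sizes.length
  let epochs_per := max 1 (PySem.Int.floordiv total_epochs n)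
  let schedule := (PySem.List.slice sizes none (some (-1))).map (fun sz => (sz, epochs_per))
  schedule ++ [(final_size, total_epochs - epochs_per * (n - 1))]

-- ===== PORT B =====
def build_progressive_schedule_alt (init_size : Int) (final_size : Int) (total_epochs : Int) : List (Int × Int) :=
  let count : Nat :=
    if init_size < final_size ∧ 0 < init_size then
      PySem.Int.bitLength (PySem.Int.floordiv (final_size - 1) init_size)
    else 0
  let sizes := ((List.range count).map (fun i => init_size * 2 ^ i)) ++ [final_size]
  let n : Int := sizes.length
  let epochs_per := max 1 (PySem.Int.floordiv total_epochs n)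
  let tail := (final_size, total_epochs - epochs_per * (n - 1))
  (PySem.List.slice sizes none (some (-1))).map (fun sz => (sz, epochs_per)) ++ [tail]

-- ===== PRECONDITION & SPEC =====
-- Pre_ excludes exactly the inputs where A's while-loop never terminates
-- (init_size ≤ 0 < final_size: s never reaches final_size); A returns on all others.
def Pre_build_progressive_schedule (init_size : Int) (final_size : Int) (total_epochs : Int) : Prop :=
  0 < init_size ∨ final_size ≤ init_size
instance (init_size : Int) (final_size : Int) (total_epochs : Int) : Decidable (Pre_build_progressive_schedule init_size final_size total_epochs) := by unfold Pre_build_progressive_schedule; infer_instance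

def pvWitness_build_progressive_schedule : Int × Int × Int := (4, 64, 20)

def Spec_build_progressive_schedule (init_size : Int) (final_size : Int) (total_epochs : Int) (out : List (Int × Int)) : Prop := out = build_progressive_schedule_alt init_size final_size total_epochs
instance (init_size : Int) (final_size : Int) (total_epochs : Int) (out : List (Int × Int)) : Decidable (Spec_build_progressive_schedule init_size final_size total_epochs out) := by unfold Spec_build_progressive_schedule; infer_instance

-- ===== CLAIM (what is proved, stated in full; the proofs are below) =====
def Claim_equal_build_progressive_schedule : Prop := ∀ (init_size : Int) (final_size : Int) (total_epochs : Int), Dom_build_progressive_schedule init_size final_size total_epochs → Pre_build_progressive_schedule init_size final_size total_epochs → Spec_build_progressive_schedule init_size final_size total_epochs (build_progressive_schedule init_size final_size total_epochs)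

-- ===== LEMMAS AND PROOFS =====

-- level count of B, as a function of the current loop variable s
def pvCnt (final_size s : Int) : Nat :=
  if s < final_size then PySem.Int.bitLength (PySem.Int.floordiv (final_size - 1) s) else 0

lemma pvCnt_step (final_size s : Int) (hs : 0 < s) (h : s < final_size) :
    pvCnt final_size s = pvCnt final_size (s * 2) + 1 := by
  unfold pvCnt
  rw [if_pos h]
  have hq1 : 1 ≤ PySem.Int.floordiv (final_size - 1) s := by
    rw [PySem.Int.le_floordiv_iff_mul_le hs]; omega
  by_cases h2 : s * 2 < final_size
  · rw [if_pos h2]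
    have hchain : PySem.Int.floordiv (final_size - 1) (s * 2) =
        PySem.Int.floordiv (PySem.Int.floordiv (final_size - 1) s) 2 := by
      rw [PySem.Int.floordiv_eq_ediv_of_pos hs,
          PySem.Int.floordiv_eq_ediv_of_pos (by omega : (0:Int) < s * 2),
          PySem.Int.floordiv_eq_ediv_of_pos (by omega : (0:Int) < 2),
          Int.ediv_ediv_of_nonneg (by omega : (0:Int) ≤ s)]
    rw [hchain, ← PySem.Int.bitLength_of_pos (by omega : (0:Int) < PySem.Int.floordiv (final_size - 1) s)]
  · rw [if_neg h2]
    have hq : PySem.Int.floordiv (final_size - 1) s = 1 := by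
      rw [PySem.Int.floordiv_eq_iff_of_pos hs]
      constructor <;> omega
    rw [hq]; decide

lemma pvLoopA_eq (final_size : Int) (s : Int) (hs : 0 < s) (acc : List Int) :
    pvLoopA final_size s acc = acc ++ (List.range (pvCnt final_size s)).map (fun i => s * 2 ^ i) := by
  rw [pvLoopA]
  by_cases h : s < final_size
  · rw [if_pos ⟨hs, h⟩,
        pvLoopA_eq final_size (s * 2) (by omega) (acc ++ [s]),
        pvCnt_step final_size s hs h, List.range_succ_eq_map]
    have hfun : (fun i => s * 2 ^ (i + 1)) = (fun i => (s * 2) * 2 ^ i) := by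
      funext i; rw [pow_succ]; ring
    simp [List.map_map, Function.comp_def, hfun]
  · rw [if_neg (by tauto)]
    unfold pvCnt
    rw [if_neg h]
    simp
termination_by (final_size - s).toNat
decreasing_by omega

-- ===== VERDICT (by name: the statement is the Claim_ definition above) =====
theorem build_progressive_schedule_spec : Claim_equal_build_progressive_schedule := by
  intro init_size final_size total_epochs _ hpre
  unfold Spec_build_progressive_schedule build_progressive_schedule build_progressive_schedule_alt
  have hsizes : pvLoopA final_size init_size [] =
      (List.range (if init_size < final_size ∧ 0 < init_size then
          PySem.Int.bitLength (PySem.Int.floordiv (final_size - 1) init_size) else 0)).map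
        (fun i => init_size * 2 ^ i) := by
    by_cases hi : 0 < init_size
    · rw [pvLoopA_eq final_size init_size hi]
      unfold pvCnt
      by_cases hf : init_size < final_size
      · rw [if_pos hf, if_pos ⟨hf, hi⟩]; simp
      · rw [if_neg hf, if_neg (by tauto)]; simp
    · have hf : final_size ≤ init_size := hpre.resolve_left hi
      rw [pvLoopA, if_neg (by omega), if_neg (by omega)]
      simp
  simp only [hsizes]
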